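-- pv_equiv track=rewrite | github.com/cogni-work/insight-wave | cogni-wiki/skills/wiki-lint/scripts/lint_wiki.py | _expand_fix_classes
-- ===== SOURCE A (Python) =====
-- FIX_CLASSES = (
--     "reverse_link_missing",
--     "synthesis_no_wiki_source",
--     "entries_count_drift",
--     "frontmatter_defaults",
--     "alphabetisation",
-- )
--
-- def _expand_fix_classes(raw: list) -> set:
--     """Resolve the repeatable --fix list (incl. `all`) into a set."""
--     out: set = set()
--     for v in raw or []:
--         if v == "all":
--             out.update(FIX_CLASSES)
--         else:
--             out.add(v)
--     return out
-- ===== SOURCE B (Python) =====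
-- FIX_CLASSES = (
--     "reverse_link_missing",
--     "synthesis_no_wiki_source",
--     "entries_count_drift",
--     "frontmatter_defaults",
--     "alphabetisation",
-- )
--
-- def _expand_fix_classes(raw: list) -> set:
--     """Resolve the repeatable --fix list (incl. `all`) into a set.
--
--     Divide and conquer: the set for a list is the union of the sets of its
--     two halves; a singleton expands to FIX_CLASSES when it is the sentinel
--     'all', otherwise to itself.  Correct because set union is associative,
--     so the split points do not matter.
--     """
--     def go(xs):
--         if not xs:
--             return set()
--         if len(xs) == 1:
--             v = xs[0]
--             return set(FIX_CLASSES) if v == "all" else {v}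
--         mid = len(xs) // 2
--         return go(xs[:mid]) | go(xs[mid:])
--     return go(raw or [])
-- ===== Notes on version B (the rewrite author's own statement) =====
-- stated objective: alternative
-- what changed: Replaces A's sequential loop that mutates one accumulator set element by element with a divide-and-conquer recursion: split the list in halves, expand each half independently, and combine the results with set union (correct since union is associative).
import Mathlib
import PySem

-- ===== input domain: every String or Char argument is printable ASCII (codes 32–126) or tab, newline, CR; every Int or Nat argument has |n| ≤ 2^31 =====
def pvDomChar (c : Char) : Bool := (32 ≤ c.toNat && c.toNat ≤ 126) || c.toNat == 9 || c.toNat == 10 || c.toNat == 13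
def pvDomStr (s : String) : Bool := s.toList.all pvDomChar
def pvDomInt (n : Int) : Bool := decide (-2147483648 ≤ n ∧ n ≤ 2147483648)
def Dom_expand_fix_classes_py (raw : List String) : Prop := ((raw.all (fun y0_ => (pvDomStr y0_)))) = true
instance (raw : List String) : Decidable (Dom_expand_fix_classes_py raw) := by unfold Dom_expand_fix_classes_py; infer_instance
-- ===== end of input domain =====

-- B replaces A's sequential mutate-one-set loop by a divide-and-conquer recursion
-- (union of the two halves' sets); a different decomposition, same result.

def pvFixClasses : List String :=
  ["reverse_link_missing", "synthesis_no_wiki_source", "entries_count_drift",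
   "frontmatter_defaults", "alphabetisation"]

-- ===== PORT A =====
-- 'raw or []' is 'raw' for a list argument; out.update / out.add per element.
def expand_fix_classes_py (raw : List String) : List String :=
  raw.foldl
    (fun out v =>
      if v == "all" then PySem.Set.update out pvFixClasses
      else PySem.Set.add out v)
    PySem.Set.empty

-- ===== PORT B =====
-- go(xs): empty → set(); singleton → set(FIX_CLASSES) or {v}; else union of halves.
def pvGo (xs : List String) : PySem.Set String :=
  if xs.length = 0 then PySem.Set.empty
  else if xs.length = 1 then
    (if xs.headD "" == "all" then PySem.Set.ofList pvFixClasses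
     else PySem.Set.ofList [xs.headD ""])
  else
    PySem.Set.union (pvGo (xs.take (xs.length / 2))) (pvGo (xs.drop (xs.length / 2)))
termination_by xs.length
decreasing_by
  · simp only [List.length_take]; omega
  · simp only [List.length_drop]; omega

def expand_fix_classes_py_alt (raw : List String) : List String :=
  pvGo raw

-- ===== PRECONDITION & SPEC =====
def Spec_expand_fix_classes_py (raw : List String) (out : List String) : Prop := out = expand_fix_classes_py_alt raw
instance (raw : List String) (out : List String) : Decidable (Spec_expand_fix_classes_py raw out) := by unfold Spec_expand_fix_classes_py; infer_instance

-- ===== CLAIM (what is proved, stated in full; the proofs are below) =====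
def Claim_equal_expand_fix_classes_py : Prop := ∀ (raw : List String), Dom_expand_fix_classes_py raw → Spec_expand_fix_classes_py raw (expand_fix_classes_py raw)

-- ===== LEMMAS AND PROOFS =====

-- each element's expansion as a list
def pvExpandList (v : String) : List String :=
  if v == "all" then pvFixClasses else [v]

-- A's loop is set(flattened expansions), in first-occurrence order.
theorem foldA_eq_ofList_flatMap (raw : List String) (s : PySem.Set String) :
    raw.foldl
        (fun out v =>
          if v == "all" then PySem.Set.update out pvFixClasses
          else PySem.Set.add out v) s
      = (raw.flatMap pvExpandList).foldl PySem.Set.add s := by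
  induction raw generalizing s with
  | nil => rfl
  | cons x xs ih =>
      simp only [List.flatMap_cons, List.foldl_append, List.foldl_cons]
      rw [← ih]
      by_cases h : x == "all" <;> simp [h, pvExpandList, PySem.Set.update]

theorem update_ofList (s : PySem.Set String) (l : List String) :
    PySem.Set.update s (PySem.Set.ofList l) = PySem.Set.update s l := by
  rw [PySem.Set.update_eq_append_filter, PySem.Set.update_eq_append_filter,
    PySem.Set.ofList_ofList]

-- B's divide-and-conquer also computes set(flattened expansions).
theorem pvGo_eq_ofList_flatMap (xs : List String) :
    pvGo xs = PySem.Set.ofList (xs.flatMap pvExpandList) := by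
  rw [pvGo]
  by_cases h0 : xs.length = 0
  · have : xs = [] := List.eq_nil_of_length_eq_zero h0
    simp [this, h0, PySem.Set.empty]
  · by_cases h1 : xs.length = 1
    · obtain ⟨v, rfl⟩ := List.length_eq_one_iff.mp h1
      by_cases h : v == "all" <;>
        simp [h0, h1, h, pvExpandList, update_ofList]
    · have ht := pvGo_eq_ofList_flatMap (xs.take (xs.length / 2))
      have hd := pvGo_eq_ofList_flatMap (xs.drop (xs.length / 2))
      simp only [h0, h1, if_false, ht, hd]
      have hsplit : xs = xs.take (xs.length / 2) ++ xs.drop (xs.length / 2) :=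
        (List.take_append_drop _ xs).symm
      conv_rhs => rw [hsplit]
      rw [List.flatMap_append, PySem.Set.ofList_append]
      exact update_ofList _ _
termination_by xs.length
decreasing_by
  · simp only [List.length_take]; omega
  · simp only [List.length_drop]; omega

-- ===== VERDICT (by name: the statement is the Claim_ definition above) =====
theorem expand_fix_classes_py_spec : Claim_equal_expand_fix_classes_py := by
  intro raw _
  unfold Spec_expand_fix_classes_py expand_fix_classes_py expand_fix_classes_py_alt
  rw [foldA_eq_ofList_flatMap, pvGo_eq_ofList_flatMap, PySem.Set.ofList_eq_foldl]
  rfl
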